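-- pv_equiv track=rewrite | github.com/ThetaMKZ621/NeteaseCloudMusic | Versions/1.0.60.py | list_to_name
-- ===== SOURCE A (Python) =====
-- def list_to_name(list):
--     filename = ""
--     number = 0
--     for n in list:
--         if number == 0:
--             filename = filename + n
--             number += 1
--         elif number == len(list) - 1:
--             filename = filename + ' - ' + n
--         else:
--             filename = filename + ',' + n
--             number += 1
--     filename = filename + '.mp3'
--     return filename
-- ===== SOURCE B (Python) =====
-- def list_to_name(list):
--     if not list:
--         return ".mp3"
--     *init, last = list
--     if init:
--         return ",".join(init) + " - " + last + ".mp3"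
--     return last + ".mp3"
-- ===== Notes on version B (the rewrite author's own statement) =====
-- stated objective: simpler
-- what changed: Replaced the positional-counter loop with per-element branching and repeated string concatenation by an init/last split: join the initial elements with ',', append ' - ' plus the last element.
import Mathlib
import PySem

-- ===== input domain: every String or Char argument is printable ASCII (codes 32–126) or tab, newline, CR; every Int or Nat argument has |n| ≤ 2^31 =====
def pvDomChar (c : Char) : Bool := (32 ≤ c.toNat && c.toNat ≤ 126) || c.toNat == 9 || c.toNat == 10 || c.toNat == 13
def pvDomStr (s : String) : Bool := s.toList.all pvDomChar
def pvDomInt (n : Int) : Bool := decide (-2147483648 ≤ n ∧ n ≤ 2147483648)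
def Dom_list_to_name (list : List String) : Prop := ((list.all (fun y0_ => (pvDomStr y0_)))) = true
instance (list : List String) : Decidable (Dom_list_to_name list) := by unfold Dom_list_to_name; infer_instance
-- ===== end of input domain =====

-- B replaces A's positional-counter loop with an init/last split and a ',' join (objective: simpler).

-- ===== PORT A =====
-- literal port of A: fold carrying (filename, number), comparing number with len(list) - 1
def list_to_name (list : List String) : String :=
  let st := list.foldl (fun (st : String × Int) n =>
    if st.2 = 0 then (st.1 ++ n, st.2 + 1)
    else if st.2 = (list.length : Int) - 1 then (st.1 ++ " - " ++ n, st.2)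
    else (st.1 ++ "," ++ n, st.2 + 1)) ("", 0)
  st.1 ++ ".mp3"

-- ===== PORT B =====
-- port of Source B: empty list up front; otherwise split off the last element and join the rest with ','
def list_to_name_alt (list : List String) : String :=
  match list.getLast? with
  | none => ".mp3"
  | some last =>
    let init := list.dropLast
    if init.isEmpty then last ++ ".mp3"
    else PySem.Str.join "," init ++ " - " ++ last ++ ".mp3"

-- ===== PRECONDITION & SPEC =====
def Spec_list_to_name (list : List String) (out : String) : Prop := out = list_to_name_alt list
instance (list : List String) (out : String) : Decidable (Spec_list_to_name list out) := by unfold Spec_list_to_name; infer_instance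

-- ===== CLAIM (what is proved, stated in full; the proofs are below) =====
def Claim_equal_list_to_name : Prop := ∀ (list : List String), Dom_list_to_name list → Spec_list_to_name list (list_to_name list)

-- ===== LEMMAS AND PROOFS =====

-- A's loop body, with the Python len(list) abstracted as L
def pvAStep (L : Int) (st : String × Int) (n : String) : String × Int :=
  if st.2 = 0 then (st.1 ++ n, st.2 + 1)
  else if st.2 = L - 1 then (st.1 ++ " - " ++ n, st.2)
  else (st.1 ++ "," ++ n, st.2 + 1)

theorem pvA_foldl_eq (list : List String) :
    list_to_name list = (list.foldl (pvAStep ((list.length : Int))) ("", 0)).1 ++ ".mp3" := rfl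

-- what A's middle branch accumulates over a run of elements
def pvCatComma (xs : List String) : String := xs.foldr (fun n acc => "," ++ n ++ acc) ""

-- middle elements: while 0 < number < len - 1, each step appends "," ++ n and increments number
theorem pvA_mid (L : Int) (xs : List String) (acc : String) (i : Int)
    (h1 : 0 < i) (h2 : i + xs.length ≤ L - 1) :
    xs.foldl (pvAStep L) (acc, i) = (acc ++ pvCatComma xs, i + xs.length) := by
  induction xs generalizing acc i with
  | nil => simp [pvCatComma]
  | cons x xs ih =>
    have hne0 : ¬ i = 0 := by omega
    have hneL : ¬ i = L - 1 := by simp at h2; omega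
    rw [List.foldl_cons]
    show xs.foldl (pvAStep L) (pvAStep L (acc, i) x) = _
    rw [show pvAStep L (acc, i) x = (acc ++ "," ++ x, i + 1) by
      simp [pvAStep, hne0, hneL]]
    rw [ih (acc ++ "," ++ x) (i + 1) (by omega) (by simp at h2 ⊢; omega)]
    refine Prod.ext ?_ ?_ <;> simp [pvCatComma, String.append_assoc]
    ring

-- ','.join on a nonempty list, in terms of pvCatComma
theorem pvJoin_comma (xs : List String) (x : String) :
    PySem.Str.join "," (x :: xs) = x ++ pvCatComma xs := by
  induction xs generalizing x with
  | nil =>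
    apply String.toList_inj.mp
    simp [PySem.Str.toList_join, PySem.Chars.join_singleton, pvCatComma]
  | cons y ys ih =>
    have h : PySem.Str.join "," (x :: y :: ys) = x ++ "," ++ PySem.Str.join "," (y :: ys) := by
      apply String.toList_inj.mp
      simp [PySem.Str.toList_join, PySem.Chars.join_cons_cons]
    rw [h, ih y]
    simp [pvCatComma, String.append_assoc]

-- ===== VERDICT (by name: the statement is the Claim_ definition above) =====
theorem list_to_name_spec : Claim_equal_list_to_name := by
  intro list _
  unfold Spec_list_to_name
  rw [pvA_foldl_eq]
  match list with
  | [] => simp [list_to_name_alt]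
  | [x] => simp [list_to_name_alt, pvAStep]
  | x :: xs =>
    rcases xs.eq_nil_or_concat with rfl | ⟨ys, y, rfl⟩
    · simp [list_to_name_alt, pvAStep]
    · simp only [List.concat_eq_append]
      have hL : ((x :: (ys ++ [y])).length : Int) = (ys.length : Int) + 2 := by
        simp; ring
      rw [List.foldl_cons]
      rw [show pvAStep ((x :: (ys ++ [y])).length : Int) ("", 0) x = (x, 1) by
        simp [pvAStep]]
      rw [List.foldl_append]
      rw [pvA_mid _ ys x 1 (by omega) (by rw [hL]; omega)]
      rw [List.foldl_cons, List.foldl_nil]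
      rw [show pvAStep ((x :: (ys ++ [y])).length : Int) (x ++ pvCatComma ys, 1 + (ys.length : Int)) y
            = (x ++ pvCatComma ys ++ " - " ++ y, 1 + (ys.length : Int)) by
        have h0 : ¬ (1 + (ys.length : Int) = 0) := by omega
        have hE : (1 + (ys.length : Int)) = ((x :: (ys ++ [y])).length : Int) - 1 := by
          rw [hL]; omega
        simp [pvAStep, hE]
        omega]
      have hsplit : x :: (ys ++ [y]) = (x :: ys) ++ [y] := rfl
      have hlast : (x :: (ys ++ [y])).getLast? = some y := by
        rw [hsplit, List.getLast?_concat]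
      have hdrop : (x :: (ys ++ [y])).dropLast = x :: ys := by
        rw [hsplit, List.dropLast_concat]
      simp [list_to_name_alt, hlast, hdrop, pvJoin_comma, String.append_assoc]
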